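-- pv_equiv track=rewrite | github.com/jkrshnmenon/phpil | PhpIL/utils/extract_builtin_funcs.py | calc_arg_bound
-- ===== SOURCE A (Python) =====
-- def calc_arg_bound(fmt):
--     min_num_args = 0
--     max_num_args = 0
--     have_optional = 0
--     have_varargs = 0
--     post_varargs = 0
--     for f in fmt:
--         if f in 'ldsbraoOzZChfAHpSPLn':
--             max_num_args += 1
--         elif f == '|':
--             min_num_args = max_num_args
--             have_optional = 1
--         elif f in '+*':
--             have_varargs = 1
--             if f == '+':
--                 max_num_args += 1
--             post_varargs = max_num_args
--     if not have_optional: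
--         min_num_args = max_num_args
--     if have_varargs:
--         max_num_args = -1
--     return (min_num_args, max_num_args)
-- ===== SOURCE B (Python) =====
-- ARG_CHARS = 'ldsbraoOzZChfAHpSPLn'
--
--
-- def calc_arg_bound(fmt):
--     bar = fmt.rfind('|')
--     total = sum(1 for c in fmt if c in ARG_CHARS or c == '+')
--     if bar == -1:
--         min_num_args = total
--     else:
--         min_num_args = sum(1 for c in fmt[:bar] if c in ARG_CHARS or c == '+')
--     max_num_args = -1 if ('+' in fmt or '*' in fmt) else total
--     return (min_num_args, max_num_args)
-- ===== Notes on version B (the rewrite author's own statement) =====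
-- stated objective: alternative
-- what changed: Replaces A's single stateful five-variable scan by a count-based formulation: min is the count of argument-consuming characters before the last optional marker (located with rfind), or the total count when there is none; max is -1 exactly when a varargs marker occurs, else the total count.
import Mathlib
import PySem

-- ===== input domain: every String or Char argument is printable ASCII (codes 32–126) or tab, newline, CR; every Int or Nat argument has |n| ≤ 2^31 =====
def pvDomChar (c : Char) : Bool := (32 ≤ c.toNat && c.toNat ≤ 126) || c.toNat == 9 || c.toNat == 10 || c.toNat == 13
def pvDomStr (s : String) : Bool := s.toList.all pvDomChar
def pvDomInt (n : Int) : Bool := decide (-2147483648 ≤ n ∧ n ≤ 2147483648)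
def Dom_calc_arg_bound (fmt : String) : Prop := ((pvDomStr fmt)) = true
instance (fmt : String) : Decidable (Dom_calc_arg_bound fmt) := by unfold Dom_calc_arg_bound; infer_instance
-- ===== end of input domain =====

-- ===== PORT A =====
-- B replaces A's single stateful scan by counts and a last-'|' search (same return value).
-- 'ldsbraoOzZChfAHpSPLn' as a list of characters
def pvArgChars : List Char :=
  ['l','d','s','b','r','a','o','O','z','Z','C','h','f','A','H','p','S','P','L','n']

-- literal transliteration of A's loop body; state = (min, max, have_optional, have_varargs, post_varargs)
def pvStepA (st : Int × Int × Int × Int × Int) (f : Char) : Int × Int × Int × Int × Int :=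
  let (mn, mx, ho, hv, pv) := st
  if pvArgChars.contains f then (mn, mx + 1, ho, hv, pv)
  else if f = '|' then (mx, mx, 1, hv, pv)
  else if f = '+' || f = '*' then
    let mx' := if f = '+' then mx + 1 else mx
    (mn, mx', ho, 1, mx')
  else st

def calc_arg_bound (fmt : String) : Int × Int :=
  let s := fmt.toList.foldl pvStepA (0, 0, 0, 0, 0)
  let mn := s.1
  let mx := s.2.1
  let ho := s.2.2.1
  let hv := s.2.2.2.1
  let mn' := if ho = 0 then mx else mn
  let mx' := if hv ≠ 0 then -1 else mx
  (mn', mx')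

-- ===== PORT B =====
-- fmt.rfind('|') : hand port of str.rfind for a one-character needle — index of the last
-- occurrence, or -1 if absent (exact on every string).
def pvRfindBar (cs : List Char) : Int :=
  cs.zipIdx.foldl (fun acc p => if p.1 = '|' then (p.2 : Int) else acc) (-1)

-- sum(1 for c in cs if c in ARG_CHARS or c == '+')
def pvCountArgs (cs : List Char) : Int :=
  (cs.countP (fun c => pvArgChars.contains c || c = '+') : Int)

def calc_arg_bound_alt (fmt : String) : Int × Int :=
  let cs := fmt.toList
  let bar := pvRfindBar cs
  let total := pvCountArgs cs
  let mn := if bar = -1 then total else pvCountArgs (cs.take bar.toNat)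
  let mx := if cs.contains '+' || cs.contains '*' then -1 else total
  (mn, mx)

-- ===== PRECONDITION & SPEC =====
def Spec_calc_arg_bound (fmt : String) (out : Int × Int) : Prop := out = calc_arg_bound_alt fmt
instance (fmt : String) (out : Int × Int) : Decidable (Spec_calc_arg_bound fmt out) := by unfold Spec_calc_arg_bound; infer_instance

-- ===== CLAIM (what is proved, stated in full; the proofs are below) =====
def Claim_equal_calc_arg_bound : Prop := ∀ (fmt : String), Dom_calc_arg_bound fmt → Spec_calc_arg_bound fmt (calc_arg_bound fmt)

-- ===== LEMMAS AND PROOFS =====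

theorem pvStepA_arg (mn mx ho hv pv : Int) (c : Char) (h : c ∈ pvArgChars) :
    pvStepA (mn, mx, ho, hv, pv) c = (mn, mx + 1, ho, hv, pv) := by
  simp [pvStepA, h]

theorem pvStepA_bar (mn mx ho hv pv : Int) :
    pvStepA (mn, mx, ho, hv, pv) '|' = (mx, mx, 1, hv, pv) := by
  simp [pvStepA, show '|' ∉ pvArgChars from by decide]

theorem pvStepA_plus (mn mx ho hv pv : Int) :
    pvStepA (mn, mx, ho, hv, pv) '+' = (mn, mx + 1, ho, 1, mx + 1) := by
  simp [pvStepA, show '+' ∉ pvArgChars from by decide]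

theorem pvStepA_star (mn mx ho hv pv : Int) :
    pvStepA (mn, mx, ho, hv, pv) '*' = (mn, mx, ho, 1, mx) := by
  simp [pvStepA, show '*' ∉ pvArgChars from by decide]

theorem pvStepA_other (s : Int × Int × Int × Int × Int) (c : Char)
    (h1 : c ∉ pvArgChars) (h2 : c ≠ '|') (h3 : c ≠ '+') (h4 : c ≠ '*') :
    pvStepA s c = s := by
  obtain ⟨a, b, d, e, f⟩ := s
  simp [pvStepA, h1, h2, h3, h4]

theorem pvRfindBar_concat (cs : List Char) (c : Char) :
    pvRfindBar (cs ++ [c]) = if c = '|' then (cs.length : Int) else pvRfindBar cs := by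
  simp [pvRfindBar, List.zipIdx_append, List.foldl_append]

theorem pvRfindBar_lt (cs : List Char) :
    pvRfindBar cs < (cs.length : Int) ∧ -1 ≤ pvRfindBar cs := by
  induction cs using List.reverseRecOn with
  | nil => decide
  | append_singleton cs c ih =>
    rw [pvRfindBar_concat]
    simp only [List.length_append, List.length_cons, List.length_nil]
    split <;> push_cast <;> omega

theorem pvRfindBar_neg_one_iff (cs : List Char) : pvRfindBar cs = -1 ↔ '|' ∉ cs := by
  induction cs using List.reverseRecOn with
  | nil => decide
  | append_singleton cs c ih =>
    rw [pvRfindBar_concat]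
    rcases eq_or_ne c '|' with h | h
    · subst h
      rw [if_pos rfl]
      constructor
      · intro habs; exact absurd habs (by omega)
      · intro habs; exact absurd (by simp : ('|' : Char) ∈ cs ++ ['|']) habs
    · rw [if_neg h, ih]
      simp [List.mem_append, Ne.symm h]

theorem pvCountArgs_append (cs ds : List Char) :
    pvCountArgs (cs ++ ds) = pvCountArgs cs + pvCountArgs ds := by
  simp [pvCountArgs, List.countP_append]

theorem pvCountArgs_singleton_arg (c : Char) (h : c ∈ pvArgChars) :
    pvCountArgs [c] = 1 := by
  simp [pvCountArgs, h]

theorem pvCountArgs_singleton_other (c : Char) (h1 : c ∉ pvArgChars)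
    (h3 : c ≠ '+') : pvCountArgs [c] = 0 := by
  simp [pvCountArgs, h1, h3]

theorem pvMemConcatIff (x c : Char) (cs : List Char) (h : x ≠ c) :
    x ∈ cs ++ [c] ↔ x ∈ cs := by
  simp [List.mem_append, h]

-- characterisation of A's loop state after any prefix (pv plays no role in the result)
theorem pvFoldA_spec (cs : List Char) :
    ∃ pv, cs.foldl pvStepA (0, 0, 0, 0, 0) =
      ((if pvRfindBar cs = -1 then 0 else pvCountArgs (cs.take (pvRfindBar cs).toNat)),
       pvCountArgs cs,
       (if '|' ∈ cs then (1 : Int) else 0),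
       (if '+' ∈ cs ∨ '*' ∈ cs then (1 : Int) else 0),
       pv) := by
  induction cs using List.reverseRecOn with
  | nil => exact ⟨0, by decide⟩
  | append_singleton cs c ih =>
    obtain ⟨pv, hpv⟩ := ih
    rw [List.foldl_append, hpv, List.foldl_cons, List.foldl_nil]
    rcases eq_or_ne c '|' with hb | hb
    · -- '|' : min becomes the current max, have_optional is set
      subst hb
      refine ⟨pv, ?_⟩
      rw [pvStepA_bar]
      have h1 : pvRfindBar (cs ++ ['|']) = (cs.length : Int) := by
        rw [pvRfindBar_concat, if_pos rfl]
      have h2 : pvCountArgs (cs ++ ['|']) = pvCountArgs cs := by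
        rw [pvCountArgs_append, show pvCountArgs ['|'] = 0 from by decide, add_zero]
      have h3 : ¬ ((cs.length : Int) = -1) := by omega
      have h4 : (cs ++ ['|']).take ((cs.length : Int)).toNat = cs := by
        simp
      have h5 : '|' ∈ cs ++ ['|'] := by simp
      have h6 : ('+' ∈ cs ++ ['|'] ∨ '*' ∈ cs ++ ['|']) ↔ ('+' ∈ cs ∨ '*' ∈ cs) := by
        rw [pvMemConcatIff '+' '|' cs (by decide), pvMemConcatIff '*' '|' cs (by decide)]
      rw [h1, if_neg h3, h4, h2, if_pos h5]
      simp only [h6]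
    · -- c ≠ '|' : the position of the last '|' (and hence min) is unchanged
      have h1 : pvRfindBar (cs ++ [c]) = pvRfindBar cs := by
        rw [pvRfindBar_concat, if_neg hb]
      have hbar := (pvRfindBar_lt cs).1
      have htake : (cs ++ [c]).take (pvRfindBar cs).toNat = cs.take (pvRfindBar cs).toNat :=
        List.take_append_of_le_length (by omega)
      have hho : ('|' ∈ cs ++ [c]) ↔ '|' ∈ cs := pvMemConcatIff '|' c cs (Ne.symm hb)
      by_cases harg : c ∈ pvArgChars
      · have hplus : c ≠ '+' := by
          intro h; rw [h] at harg; exact absurd harg (by decide)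
        have hstar : c ≠ '*' := by
          intro h; rw [h] at harg; exact absurd harg (by decide)
        refine ⟨pv, ?_⟩
        rw [pvStepA_arg _ _ _ _ _ _ harg]
        simp only [Prod.mk.injEq]
        refine ⟨?_, ?_, ?_, ?_, trivial⟩
        · rw [h1, htake]
        · rw [pvCountArgs_append, pvCountArgs_singleton_arg c harg]
        · simp only [hho]
        · simp only [pvMemConcatIff '+' c cs (Ne.symm hplus),
            pvMemConcatIff '*' c cs (Ne.symm hstar)]
      · rcases eq_or_ne c '+' with hp | hp
        · subst hp
          refine ⟨pvCountArgs cs + 1, ?_⟩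
          rw [pvStepA_plus]
          simp only [Prod.mk.injEq]
          refine ⟨?_, ?_, ?_, ?_, trivial⟩
          · rw [h1, htake]
          · rw [pvCountArgs_append, show pvCountArgs ['+'] = 1 from by decide]
          · simp only [hho]
          · rw [if_pos (Or.inl (by simp))]
        · rcases eq_or_ne c '*' with hs | hs
          · subst hs
            refine ⟨pvCountArgs cs, ?_⟩
            rw [pvStepA_star]
            simp only [Prod.mk.injEq]
            refine ⟨?_, ?_, ?_, ?_, trivial⟩
            · rw [h1, htake]
            · rw [pvCountArgs_append, show pvCountArgs ['*'] = 0 from by decide, add_zero]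
            · simp only [hho]
            · rw [if_pos (Or.inr (by simp))]
          · refine ⟨pv, ?_⟩
            rw [pvStepA_other _ _ harg hb hp hs]
            simp only [Prod.mk.injEq]
            refine ⟨?_, ?_, ?_, ?_, trivial⟩
            · rw [h1, htake]
            · rw [pvCountArgs_append, pvCountArgs_singleton_other c harg hp, add_zero]
            · simp only [hho]
            · simp only [pvMemConcatIff '+' c cs (Ne.symm hp),
                pvMemConcatIff '*' c cs (Ne.symm hs)]

-- ===== VERDICT (by name: the statement is the Claim_ definition above) =====
theorem calc_arg_bound_spec : Claim_equal_calc_arg_bound := by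
  intro fmt _
  unfold Spec_calc_arg_bound calc_arg_bound calc_arg_bound_alt
  obtain ⟨pv, hpv⟩ := pvFoldA_spec fmt.toList
  simp only [hpv]
  rcases Decidable.em ('|' ∈ fmt.toList) with hb | hb
  · have h1 : ¬ (pvRfindBar fmt.toList = -1) := by
      intro h; exact (pvRfindBar_neg_one_iff fmt.toList).mp h hb
    by_cases hp : '+' ∈ fmt.toList <;> by_cases hs : '*' ∈ fmt.toList <;>
      simp [hb, hp, hs, h1]
  · have h1 : pvRfindBar fmt.toList = -1 := (pvRfindBar_neg_one_iff fmt.toList).mpr hb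
    by_cases hp : '+' ∈ fmt.toList <;> by_cases hs : '*' ∈ fmt.toList <;>
      simp [hb, hp, hs, h1]
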